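-- pv_equiv track=rewrite | github.com/ehrl1225/Coding_Test | 행렬 테두리 회전.py | make_num_table
-- ===== SOURCE A (Python) =====
-- def make_num_table(row,col):
--     table = []
--     for i in range(row):
--         line = []
--         for j in range(col):
--             line.append(i*col+j+1)
--         table.append(line)
--     return table
-- ===== SOURCE B (Python) =====
-- def make_num_table(row, col):
--     r, c = max(row, 0), max(col, 0)
--     nums = list(range(1, r * c + 1))
--     return [nums[i * c:(i + 1) * c] for i in range(r)]
-- ===== Notes on version B (the rewrite author's own statement) =====
-- stated objective: alternative
-- what changed: B generates the whole flat sequence 1..row*col once and reshapes it into rows by slicing, instead of computing i*col+j+1 per cell in nested loops.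
import Mathlib
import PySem

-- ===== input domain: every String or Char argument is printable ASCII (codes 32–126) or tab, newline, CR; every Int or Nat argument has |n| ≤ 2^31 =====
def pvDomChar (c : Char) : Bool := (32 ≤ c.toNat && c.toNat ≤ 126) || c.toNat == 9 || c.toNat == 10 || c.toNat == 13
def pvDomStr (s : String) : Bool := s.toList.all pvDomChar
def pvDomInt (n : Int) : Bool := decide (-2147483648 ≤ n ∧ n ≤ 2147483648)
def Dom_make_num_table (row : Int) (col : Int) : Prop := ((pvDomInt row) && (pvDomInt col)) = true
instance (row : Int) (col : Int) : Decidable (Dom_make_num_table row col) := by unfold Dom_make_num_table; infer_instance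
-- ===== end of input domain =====

-- B builds the flat sequence 1..row*col once and reshapes it into rows by slicing (alternative decomposition, same cost).

-- ===== PORT A =====
def make_num_table (row : Int) (col : Int) : List (List Int) :=
  (PySem.List.pyRange 0 row 1).foldl (fun table i =>
    table ++ [(PySem.List.pyRange 0 col 1).foldl (fun line j => line ++ [i * col + j + 1]) []]) []

-- ===== PORT B =====
def make_num_table_alt (row : Int) (col : Int) : List (List Int) :=
  let r := max row 0
  let c := max col 0
  let nums := PySem.List.pyRange 1 (r * c + 1) 1
  (PySem.List.pyRange 0 r 1).map (fun i =>
    PySem.List.slice nums (some (i * c)) (some ((i + 1) * c)))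

-- ===== PRECONDITION & SPEC =====
def Spec_make_num_table (row : Int) (col : Int) (out : List (List Int)) : Prop := out = make_num_table_alt row col
instance (row : Int) (col : Int) (out : List (List Int)) : Decidable (Spec_make_num_table row col out) := by unfold Spec_make_num_table; infer_instance

-- ===== CLAIM (what is proved, stated in full; the proofs are below) =====
def Claim_equal_make_num_table : Prop := ∀ (row : Int) (col : Int), Dom_make_num_table row col → Spec_make_num_table row col (make_num_table row col)

-- ===== LEMMAS AND PROOFS =====

theorem foldl_snoc_map {α β : Type} (f : α → β) :
    ∀ (l : List α) (acc : List β), l.foldl (fun a x => a ++ [f x]) acc = acc ++ l.map f := by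
  intro l
  induction l with
  | nil => simp
  | cons x xs ih => intro acc; simp [List.foldl, ih]

theorem row_eq (row col i : Int) (h0 : 0 ≤ i) (h1 : i < row) :
    PySem.List.slice (PySem.List.pyRange 1 (row * col + 1) 1) (some (i * col)) (some ((i + 1) * col))
      = (PySem.List.pyRange 0 col 1).map (fun j => i * col + j + 1) := by
  by_cases hc : col ≤ 0
  · have hrow : 0 < row := lt_of_le_of_lt h0 h1
    have hn : row * col + 1 ≤ 1 := by nlinarith
    rw [PySem.List.pyRange_one_eq_nil hn, PySem.List.pyRange_one_eq_nil (by omega : col ≤ 0)]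
    simp [PySem.List.slice]
  · push Not at hc
    have hic : 0 ≤ i * col := mul_nonneg h0 (le_of_lt hc)
    have hm1 : (1 : Int) ≤ i * col + 1 := by omega
    have hm2 : i * col + 1 ≤ (i + 1) * col + 1 := by nlinarith
    have hm3 : (i + 1) * col + 1 ≤ row * col + 1 := by nlinarith
    rw [PySem.List.pyRange_one_append 1 (i * col + 1) (row * col + 1) hm1 (le_trans hm2 hm3),
        PySem.List.pyRange_one_append (i * col + 1) ((i + 1) * col + 1) (row * col + 1) hm2 hm3,
        PySem.List.slice_toNat _ hic (by nlinarith : (0:Int) ≤ (i + 1) * col)]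
    have hlen1 : (PySem.List.pyRange 1 (i * col + 1) 1).length = (i * col).toNat := by
      rw [PySem.List.length_pyRange_one]; congr 1; omega
    have hlen2 : (PySem.List.pyRange (i * col + 1) ((i + 1) * col + 1) 1).length = col.toNat := by
      rw [PySem.List.length_pyRange_one]; congr 1; nlinarith
    rw [show (i * col).toNat = (PySem.List.pyRange 1 (i * col + 1) 1).length from hlen1.symm, List.drop_left, hlen1]
    have htake : ((i + 1) * col).toNat - (i * col).toNat = col.toNat := by
      have : (i + 1) * col = i * col + col := by ring
      omega
    rw [htake, ← hlen2, List.take_left]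
    rw [PySem.List.pyRange_one, PySem.List.pyRange_one, List.map_map]
    have : (i + 1) * col + 1 - (i * col + 1) = col := by ring
    rw [this, show col - 0 = col from by ring]
    apply List.map_congr_left
    intro k _
    simp
    ring

-- ===== VERDICT (by name: the statement is the Claim_ definition above) =====
theorem pyRange_zero_max (n : Int) : PySem.List.pyRange 0 n 1 = PySem.List.pyRange 0 (max n 0) 1 := by
  by_cases h : n ≤ 0
  · rw [PySem.List.pyRange_one_eq_nil h, PySem.List.pyRange_one_eq_nil (by omega)]
  · rw [show max n 0 = n from by omega]

theorem make_num_table_spec : Claim_equal_make_num_table := by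
  intro row col _
  unfold Spec_make_num_table make_num_table make_num_table_alt
  rw [foldl_snoc_map, pyRange_zero_max row]
  simp only [List.nil_append]
  apply List.map_congr_left
  intro i hi
  rw [PySem.List.mem_pyRange_one] at hi
  rw [foldl_snoc_map]
  simp only [List.nil_append]
  rw [pyRange_zero_max col]
  by_cases hcol : col ≤ 0
  · have h0 : max col 0 = 0 := by omega
    rw [h0, show max row 0 * 0 + 1 = 1 from by ring]
    simp [PySem.List.pyRange_one_eq_nil (le_refl (0 : Int)),
          PySem.List.pyRange_one_eq_nil (le_refl (1 : Int)), PySem.List.slice]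
  · have hme : max col 0 = col := by omega
    rw [hme]
    exact (row_eq (max row 0) col i hi.1 hi.2).symm
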